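-- pv_equiv track=rewrite | github.com/nitishtalekar/ProjectsGit | Common/Ongoing/LoveCalc/main.py | lcalc
-- ===== SOURCE A (Python) =====
-- def lcalc(s):
--     sum = 0
--     if len(s) == 1:
--         return s
--     elif len(s) == 0:
--         return ""
--     sum = str(int(s[0]) + int(s[-1])) + str(lcalc(s[1:-1]))
--     return sum
-- ===== SOURCE B (Python) =====
-- def lcalc(s):
--     parts = []
--     i, j = 0, len(s) - 1
--     while i < j:
--         parts.append(str(int(s[i]) + int(s[j])))
--         i += 1
--         j -= 1
--     if i == j:
--         parts.append(s[i])
--     return ''.join(parts)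
-- ===== Notes on version B (the rewrite author's own statement) =====
-- stated objective: simpler
-- what changed: Replaces the recursion that rebuilds a slice s[1:-1] at every level with a single iterative two-pointer loop collecting the parts and joining once.
import Mathlib
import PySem

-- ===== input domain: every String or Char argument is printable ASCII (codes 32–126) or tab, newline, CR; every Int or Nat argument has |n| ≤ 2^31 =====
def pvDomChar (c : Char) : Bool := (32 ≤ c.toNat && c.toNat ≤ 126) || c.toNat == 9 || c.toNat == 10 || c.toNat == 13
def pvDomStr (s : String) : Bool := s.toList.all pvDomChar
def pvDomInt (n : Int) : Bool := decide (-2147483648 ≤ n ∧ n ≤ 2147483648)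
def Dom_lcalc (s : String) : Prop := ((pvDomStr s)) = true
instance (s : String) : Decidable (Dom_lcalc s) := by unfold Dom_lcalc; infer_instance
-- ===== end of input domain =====

-- B replaces A's recursion (which re-slices s[1:-1] at every level) by a single
-- iterative two-pointer loop that collects the parts and joins them once.

-- int(c) for a one-character string c; the default 0 is only reached where Python's
-- int() raises ValueError, which Pre_lcalc excludes.
def pyIntChar (c : Char) : Int := (PySem.Int.ofChars? [c]).getD 0

-- ===== PORT A =====
-- A on the character list: if len==1 → s; elif len==0 → ""; else str(int(s[0])+int(s[-1])) + lcalc(s[1:-1]).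
-- The Nat argument is only a structural-recursion fuel guard (s.length suffices: each call drops 2 chars).
def lcalcA : Nat → List Char → List Char
  | 0, _ => []
  | fuel + 1, l =>
    if l.length = 1 then l
    else if l.length = 0 then []
    else
      PySem.Int.toChars (pyIntChar (PySem.List.pyGetD l 0 ' ') + pyIntChar (PySem.List.pyGetD l (-1) ' ')) ++
        lcalcA fuel (PySem.List.slice l (some 1) (some (-1)))

def lcalc (s : String) : String := String.ofList (lcalcA s.toList.length s.toList)

-- ===== PORT B =====
-- the while-loop of B: i, j are the two pointers; result is the list `parts`.
-- The Nat argument is only a fuel guard for the loop (s.length iterations suffice).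
def lcalcB (cs : List Char) : Nat → Int → Int → List (List Char)
  | 0, _, _ => []
  | fuel + 1, i, j =>
    if i < j then
      PySem.Int.toChars (pyIntChar (PySem.List.pyGetD cs i ' ') + pyIntChar (PySem.List.pyGetD cs j ' '))
        :: lcalcB cs fuel (i + 1) (j - 1)
    else if i = j then [[PySem.List.pyGetD cs i ' ']]
    else []

def lcalc_alt (s : String) : String :=
  String.ofList (lcalcB s.toList s.toList.length 0 ((s.toList.length : Int) - 1)).flatten

-- ===== PRECONDITION & SPEC =====
-- Pre_ excludes exactly the strings on which Python's int() raises ValueError inside A: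
-- some character other than the middle one of an odd-length string is not a decimal digit.
def Pre_lcalc (s : String) : Prop :=
  ∀ i, i < s.toList.length → 2 * i + 1 ≠ s.toList.length → (s.toList.getD i ' ').isDigit = true
instance (s : String) : Decidable (Pre_lcalc s) := by unfold Pre_lcalc; infer_instance

def pvWitness_lcalc : String := "123"

def Spec_lcalc (s : String) (out : String) : Prop := out = lcalc_alt s
instance (s : String) (out : String) : Decidable (Spec_lcalc s out) := by unfold Spec_lcalc; infer_instance

-- ===== CLAIM (what is proved, stated in full; the proofs are below) =====
def Claim_equal_lcalc : Prop := ∀ (s : String), Dom_lcalc s → Pre_lcalc s → Spec_lcalc s (lcalc s)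

-- ===== LEMMAS AND PROOFS =====

theorem slice_one_neg_one (l : List Char) :
    PySem.List.slice l (some 1) (some (-1)) = l.tail.dropLast := by
  cases l with
  | nil => simp [PySem.List.slice]
  | cons a t => simp [PySem.List.slice, List.dropLast_eq_take]

theorem pyGetD_append_len (xs : List Char) (x : Char) :
    PySem.List.pyGetD (xs ++ [x]) (xs.length : Int) ' ' = x := by
  rw [PySem.List.pyGetD_natCast]
  simp [List.getD]

theorem pyGetD_cons_succ (cs : List Char) (c : Char) (i : Int) (hi : 0 ≤ i) :
    PySem.List.pyGetD (c :: cs) (i + 1) ' ' = PySem.List.pyGetD cs i ' ' := by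
  obtain ⟨n, rfl⟩ := Int.eq_ofNat_of_zero_le hi
  rw [PySem.List.pyGetD_of_nonneg _ _ (by omega), PySem.List.pyGetD_natCast]
  have e : ((n : Int) + 1).toNat = n + 1 := by omega
  rw [e]
  simp [List.getD]

theorem pyGetD_append_lt (cs : List Char) (d : Char) (i : Int) (hi : 0 ≤ i)
    (h : i < (cs.length : Int)) :
    PySem.List.pyGetD (cs ++ [d]) i ' ' = PySem.List.pyGetD cs i ' ' := by
  obtain ⟨n, rfl⟩ := Int.eq_ofNat_of_zero_le hi
  have hn : n < cs.length := by exact_mod_cast h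
  rw [PySem.List.pyGetD_natCast, PySem.List.pyGetD_natCast]
  simp [List.getD, List.getElem?_append_left hn]

-- the fuel guard of A is irrelevant once it is at least the length
theorem lcalcA_fuel : ∀ (f g : Nat) (l : List Char), l.length ≤ f → l.length ≤ g →
    lcalcA f l = lcalcA g l := by
  intro f
  induction f with
  | zero =>
    intro g l hf _
    have : l = [] := List.length_eq_zero_iff.mp (by omega)
    subst this
    cases g <;> simp [lcalcA]
  | succ f ih =>
    intro g l hf hg
    cases g with
    | zero =>
      have : l = [] := List.length_eq_zero_iff.mp (by omega)
      subst this
      simp [lcalcA]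
    | succ g =>
      simp only [lcalcA]
      by_cases h1 : l.length = 1
      · rw [if_pos h1, if_pos h1]
      · by_cases h0 : l.length = 0
        · rw [if_neg h1, if_neg h1, if_pos h0, if_pos h0]
        · rw [if_neg h1, if_neg h1, if_neg h0, if_neg h0]
          have hsl : (PySem.List.slice l (some 1) (some (-1))).length = l.length - 2 := by
            rw [slice_one_neg_one]
            simp only [List.length_dropLast, List.length_tail]
            omega
          rw [ih g _ (by omega) (by omega)]

-- shifting both pointers by one past a new head leaves the loop's output unchanged
theorem lcalcB_shift : ∀ (f : Nat) (cs : List Char) (c : Char) (i j : Int), 0 ≤ i →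
    lcalcB (c :: cs) f (i + 1) (j + 1) = lcalcB cs f i j := by
  intro f
  induction f with
  | zero => intro cs c i j _; rfl
  | succ f ih =>
    intro cs c i j hi
    by_cases hlt : i < j
    · conv_lhs => rw [lcalcB]
      conv_rhs => rw [lcalcB]
      rw [if_pos (show i + 1 < j + 1 by omega), if_pos hlt,
        pyGetD_cons_succ cs c i hi, pyGetD_cons_succ cs c j (by omega)]
      have e : j + 1 - 1 = (j - 1) + 1 := by ring
      rw [e, ih cs c (i + 1) (j - 1) (by omega)]
    · by_cases heq : i = j
      · subst heq
        conv_lhs => rw [lcalcB]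
        conv_rhs => rw [lcalcB]
        rw [if_neg (show ¬ i + 1 < i + 1 by omega), if_neg hlt,
          if_pos (rfl : i + 1 = i + 1), if_pos (rfl : i = i), pyGetD_cons_succ cs c i hi]
      · conv_lhs => rw [lcalcB]
        conv_rhs => rw [lcalcB]
        rw [if_neg (show ¬ i + 1 < j + 1 by omega), if_neg hlt,
          if_neg (show ¬ i + 1 = j + 1 by omega), if_neg heq]

-- a last element the pointers never reach does not affect the loop's output
theorem lcalcB_dropLast : ∀ (f : Nat) (cs : List Char) (d : Char) (i j : Int), 0 ≤ i →
    j < (cs.length : Int) → lcalcB (cs ++ [d]) f i j = lcalcB cs f i j := by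
  intro f
  induction f with
  | zero => intro cs d i j _ _; rfl
  | succ f ih =>
    intro cs d i j hi hj
    by_cases hlt : i < j
    · conv_lhs => rw [lcalcB]
      conv_rhs => rw [lcalcB]
      rw [if_pos hlt, if_pos hlt, pyGetD_append_lt cs d i hi (by omega),
        pyGetD_append_lt cs d j (by omega) hj, ih cs d (i + 1) (j - 1) (by omega) (by omega)]
    · by_cases heq : i = j
      · subst heq
        conv_lhs => rw [lcalcB]
        conv_rhs => rw [lcalcB]
        rw [if_neg hlt, if_neg hlt, if_pos (rfl : i = i), if_pos (rfl : i = i),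
          pyGetD_append_lt cs d i hi hj]
      · conv_lhs => rw [lcalcB]
        conv_rhs => rw [lcalcB]
        rw [if_neg hlt, if_neg hlt, if_neg heq, if_neg heq]

-- the fuel guard of B is irrelevant once it is at least the number of loop steps
theorem lcalcB_fuel : ∀ (f g : Nat) (cs : List Char) (i j : Int),
    (j - i + 1).toNat ≤ 2 * f → (j - i + 1).toNat ≤ 2 * g →
    lcalcB cs f i j = lcalcB cs g i j := by
  intro f
  induction f with
  | zero =>
    intro g cs i j hf _
    have hji : j < i := by omega
    cases g with
    | zero => rfl
    | succ g =>
      conv_rhs => rw [lcalcB]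
      rw [if_neg (show ¬ i < j by omega), if_neg (show ¬ i = j by omega)]
      rfl
  | succ f ih =>
    intro g cs i j hf hg
    cases g with
    | zero =>
      have hji : j < i := by omega
      conv_lhs => rw [lcalcB]
      rw [if_neg (show ¬ i < j by omega), if_neg (show ¬ i = j by omega)]
      rfl
    | succ g =>
      by_cases hlt : i < j
      · conv_lhs => rw [lcalcB]
        conv_rhs => rw [lcalcB]
        rw [if_pos hlt, if_pos hlt, ih g cs (i + 1) (j - 1) (by omega) (by omega)]
      · by_cases heq : i = j
        · subst heq
          conv_lhs => rw [lcalcB]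
          conv_rhs => rw [lcalcB]
          rw [if_neg hlt, if_neg hlt]
        · conv_lhs => rw [lcalcB]
          conv_rhs => rw [lcalcB]
          rw [if_neg hlt, if_neg hlt, if_neg heq]

theorem lcalc_main : (l : List Char) →
    lcalcA l.length l = (lcalcB l l.length 0 ((l.length : Int) - 1)).flatten
  | [] => rfl
  | [c] => rfl
  | c :: d :: rest => by
    have hr : (d :: rest : List Char) ≠ [] := by simp
    obtain ⟨mid, lastc, hsplit⟩ : ∃ mid lastc, d :: rest = mid ++ [lastc] :=
      ⟨(d :: rest).dropLast, (d :: rest).getLast hr, (List.dropLast_append_getLast hr).symm⟩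
    have hmid : mid.length = rest.length := by
      have := (congrArg List.length hsplit).symm
      simpa using this
    have hlc : (c :: d :: rest : List Char).length = rest.length + 1 + 1 := by simp
    rw [hlc]
    conv_lhs => rw [lcalcA]
    conv_rhs => rw [lcalcB]
    rw [if_neg (by omega : ¬ (c :: d :: rest : List Char).length = 1),
        if_neg (by omega : ¬ (c :: d :: rest : List Char).length = 0),
        if_pos (by push_cast; omega : (0:Int) < ((rest.length + 1 + 1 : Nat) : Int) - 1)]
    rw [slice_one_neg_one]
    have hdrop : (c :: d :: rest : List Char).tail.dropLast = mid := by
      simp [hsplit]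
    rw [hdrop]
    have hl : (c :: d :: rest : List Char) = (c :: mid) ++ [lastc] := by
      rw [List.cons_append, ← hsplit]
    have hlast : PySem.List.pyGetD (c :: d :: rest) (-1) ' ' = lastc := by
      rw [hl, PySem.List.pyGetD_neg_one_append_singleton]
    have hgetlast : PySem.List.pyGetD (c :: d :: rest)
        (((rest.length + 1 + 1 : Nat) : Int) - 1) ' ' = lastc := by
      have e : ((rest.length + 1 + 1 : Nat) : Int) - 1 = ((c :: mid).length : Int) := by
        simp [hmid]
      rw [e, hl, pyGetD_append_len]
    rw [hlast, hgetlast]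
    have harg : ((rest.length + 1 + 1 : Nat) : Int) - 1 - 1 = ((mid.length : Int) - 1) + 1 := by
      push_cast [hmid]; ring
    rw [harg]
    have hl2 : (c :: d :: rest : List Char) = c :: (mid ++ [lastc]) := by rw [hsplit]
    rw [hl2, lcalcB_shift (rest.length + 1) (mid ++ [lastc]) c 0 ((mid.length : Int) - 1) le_rfl,
        lcalcB_dropLast (rest.length + 1) mid lastc 0 ((mid.length : Int) - 1) le_rfl (by omega),
        lcalcA_fuel (rest.length + 1) mid.length mid (by omega) le_rfl,
        lcalcB_fuel (rest.length + 1) mid.length mid 0 ((mid.length : Int) - 1) (by omega) (by omega),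
        List.flatten_cons, lcalc_main mid]
  termination_by l => l.length
  decreasing_by simp [hmid]

-- ===== VERDICT (by name: the statement is the Claim_ definition above) =====
theorem lcalc_spec : Claim_equal_lcalc := by
  intro s _ _
  unfold Spec_lcalc lcalc lcalc_alt
  rw [lcalc_main]
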